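-- pv_equiv track=rewrite | github.com/rossjrw/tars | commands/shortest.py | get_all_substrings
-- ===== SOURCE A (Python) =====
-- def get_all_substrings(selected_name, space_allowed=True):
--     # returns a list of lists
--     # each list is every possible substring of the given name at the given
--     # length
--     # the first returned list is empty, so the index of the returned master
--     # list is synonymous with the length of each string in that list
--     all_substrings = [[]]
--     for length in range(1, len(selected_name) + 1):
--         substrings = []
--         # get name from start->length to (end-length)->end
--         for offset in range(0, len(selected_name) - length + 1):
--             substring = selected_name[offset : offset + length]
--             if ' ' not in substring or space_allowed:
--                 substrings.append(substring)
--         all_substrings.append(substrings)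
--     return all_substrings
-- ===== SOURCE B (Python) =====
-- def get_all_substrings(selected_name, space_allowed=True):
--     # DP over lengths: extend each length-L substring by its next character
--     # instead of re-slicing and re-scanning; a carried flag says whether the
--     # substring already contains a space.
--     result = [[]]
--     row = [(c, c == ' ') for c in selected_name]  # length-1 substrings + space flag
--     for length in range(1, len(selected_name) + 1):
--         result.append([s for s, sp in row if space_allowed or not sp])
--         row = [(s + c, sp or c == ' ')
--                for (s, sp), c in zip(row, selected_name[length:])]
--     return result
-- ===== Notes on version B (the rewrite author's own statement) =====
-- stated objective: alternative
-- what changed: Replaces per-substring slicing and space-scanning with a dynamic-programming row: length-(L+1) substrings are built by zipping the length-L row with the shifted string, carrying a has-space flag so the space test is O(1) per substring.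
import Mathlib
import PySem

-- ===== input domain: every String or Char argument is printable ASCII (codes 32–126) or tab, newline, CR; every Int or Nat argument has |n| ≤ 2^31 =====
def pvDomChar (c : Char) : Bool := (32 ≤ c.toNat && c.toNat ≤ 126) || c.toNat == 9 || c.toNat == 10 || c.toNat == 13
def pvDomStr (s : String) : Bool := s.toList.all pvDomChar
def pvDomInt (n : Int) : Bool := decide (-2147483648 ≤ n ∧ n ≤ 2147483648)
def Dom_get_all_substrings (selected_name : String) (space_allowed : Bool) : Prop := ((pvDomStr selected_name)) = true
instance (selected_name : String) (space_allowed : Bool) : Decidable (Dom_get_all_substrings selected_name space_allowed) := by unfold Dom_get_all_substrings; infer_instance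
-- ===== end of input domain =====

-- B replaces A's per-substring slicing and space-scan with a dynamic-programming row
-- (extend each length-L substring by its next character, carrying a has-space flag);
-- objective: alternative (same asymptotic cost, O(1) space test per substring).

-- ===== PORT A =====
def get_all_substrings (selected_name : String) (space_allowed : Bool) : List (List String) :=
  (PySem.List.pyRange 1 (PySem.Str.len selected_name + 1) 1).foldl
    (fun all_substrings length =>
      let substrings :=
        (PySem.List.pyRange 0 (PySem.Str.len selected_name - length + 1) 1).foldl
          (fun substrings offset =>
            let substring := PySem.Str.slice selected_name (some offset) (some (offset + length))
            if !(PySem.Str.isIn " " substring) || space_allowed then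
              substrings ++ [substring]
            else
              substrings)
          []
      all_substrings ++ [substrings])
    [[]]

-- ===== PORT B =====
-- row entries are (substring as its code points, has-space flag); strings are wrapped at output
def get_all_substrings_alt (selected_name : String) (space_allowed : Bool) : List (List String) :=
  let cs := selected_name.toList
  let final :=
    (PySem.List.pyRange 1 (PySem.Str.len selected_name + 1) 1).foldl
      (fun st length =>
        (st.1 ++ [(st.2.filter (fun p => space_allowed || !p.2)).map (fun p => String.ofList p.1)],
         (st.2.zip (PySem.List.slice cs (some length) none)).map
           (fun q => (q.1.1 ++ [q.2], q.1.2 || (q.2 == ' ')))))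
      ([[]], cs.map (fun c => ([c], c == ' ')))
  final.1

-- ===== PRECONDITION & SPEC =====
def Spec_get_all_substrings (selected_name : String) (space_allowed : Bool) (out : List (List String)) : Prop := out = get_all_substrings_alt selected_name space_allowed
instance (selected_name : String) (space_allowed : Bool) (out : List (List String)) : Decidable (Spec_get_all_substrings selected_name space_allowed out) := by unfold Spec_get_all_substrings; infer_instance

-- ===== CLAIM (what is proved, stated in full; the proofs are below) =====
def Claim_equal_get_all_substrings : Prop := ∀ (selected_name : String) (space_allowed : Bool), Dom_get_all_substrings selected_name space_allowed → Spec_get_all_substrings selected_name space_allowed (get_all_substrings selected_name space_allowed)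

-- ===== LEMMAS AND PROOFS =====

-- the length-L substring of cs at offset o
def pvSub (cs : List Char) (L o : Nat) : List Char := (cs.drop o).take L

-- B's row at the start of the iteration for length L (offsets 0 .. n-L)
def pvRowAt (cs : List Char) (L : Nat) : List (List Char × Bool) :=
  (List.range (cs.length + 1 - L)).map (fun o => (pvSub cs L o, decide (' ' ∈ pvSub cs L o)))

-- the list appended for length L (common characterisation of both programs)
def pvOutRow (cs : List Char) (sa : Bool) (L : Nat) : List String :=
  ((pvRowAt cs L).filter (fun p => sa || !p.2)).map (fun p => String.ofList p.1)

lemma pvRowAt_one (cs : List Char) :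
    pvRowAt cs 1 = cs.map (fun c => ([c], c == ' ')) := by
  unfold pvRowAt pvSub
  apply List.ext_getElem
  · simp
  · intro o h1 h2
    simp only [List.getElem_map, List.getElem_range]
    have hd : cs.drop o = cs[o]'(by simpa using h2) :: cs.drop (o + 1) :=
      List.drop_eq_getElem_cons (by simpa using h2)
    have ht : List.take 1 (List.drop o cs) = [cs[o]'(by simpa using h2)] := by
      rw [hd]; rfl
    rw [ht]
    by_cases hc : cs[o]'(by simpa using h2) = ' ' <;> simp [hc, @eq_comm _ ' ']

lemma pvRowStep (cs : List Char) (L : Nat) (hLn : L ≤ cs.length) :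
    ((pvRowAt cs L).zip (cs.drop L)).map
        (fun q => (q.1.1 ++ [q.2], q.1.2 || (q.2 == ' '))) = pvRowAt cs (L + 1) := by
  unfold pvRowAt
  apply List.ext_getElem
  · simp; omega
  · intro i h1 h2
    simp only [List.getElem_map, List.getElem_zip, List.getElem_range, List.getElem_drop]
    have hlen : (cs.drop L).length = cs.length - L := by simp
    have hi : i < cs.length - L := by
      simp [List.length_zip] at h1; omega
    have hiL : i + L < cs.length := by omega
    have happ : pvSub cs (L + 1) i = pvSub cs L i ++ [cs[L + i]'(by omega)] := by
      unfold pvSub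
      rw [List.take_succ]
      congr 1
      have : (cs.drop i)[L]? = some (cs[i + L]'(by omega)) := by
        rw [List.getElem?_drop, List.getElem?_eq_getElem (by omega)]
      rw [this]
      simp [show i + L = L + i by omega]
    rw [happ]
    simp only [Prod.mk.injEq]
    refine ⟨by simp, ?_⟩
    by_cases ha : ' ' ∈ pvSub cs L i <;> by_cases hb : cs[L + i]'(by omega) = ' ' <;>
      simp [ha, hb, List.mem_append, @eq_comm _ ' ']

lemma pvSliceStr (s : String) (o L : Nat) :
    PySem.Str.slice s (some (o : Int)) (some ((o : Int) + (L : Int)))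
      = String.ofList (pvSub s.toList L o) := by
  rw [show PySem.Str.slice s (some (o : Int)) (some ((o : Int) + (L : Int)))
        = String.ofList (PySem.List.slice s.toList (some (o : Int)) (some ((o : Int) + (L : Int))))
      from rfl,
    PySem.List.slice_natCast_add]
  rfl

lemma pvCond (sa : Bool) (l : List Char) :
    (!(PySem.Str.isIn " " (String.ofList l)) || sa) = (sa || !(decide (' ' ∈ l))) := by
  have hb : PySem.Chars.isIn [' '] l = decide (' ' ∈ l) := by
    by_cases h : ' ' ∈ l
    · simp only [h, decide_true]
      rw [PySem.Chars.isIn_iff_infix, List.singleton_infix_iff]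
      exact h
    · simp only [h, decide_false]
      rw [PySem.Chars.isIn_eq_false_iff, List.singleton_infix_iff]
      exact h
  have hs : PySem.Str.isIn " " (String.ofList l) = PySem.Chars.isIn [' '] l := by
    first | rfl | simp
  rw [hs, hb, Bool.or_comm]

lemma pvInnerA (s : String) (sa : Bool) (L : Nat) (hLn : L ≤ s.toList.length) :
    (PySem.List.pyRange 0 ((s.toList.length : Int) - (L : Int) + 1) 1).foldl
      (fun substrings offset =>
        if !(PySem.Str.isIn " " (PySem.Str.slice s (some offset) (some (offset + (L : Int))))) || sa then
          substrings ++ [PySem.Str.slice s (some offset) (some (offset + (L : Int)))]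
        else substrings) []
      = pvOutRow s.toList sa L := by
  rw [show (s.toList.length : Int) - (L : Int) + 1 = ((s.toList.length + 1 - L : Nat) : Int) by omega,
      PySem.List.pyRange_zero_natCast,
      PySem.List.foldl_append_if
        (fun offset => !(PySem.Str.isIn " " (PySem.Str.slice s (some offset) (some (offset + (L : Int))))) || sa)
        (fun offset => PySem.Str.slice s (some offset) (some (offset + (L : Int))))]
  rw [List.nil_append, List.filter_map, List.map_map]
  unfold pvOutRow pvRowAt
  rw [List.filter_map, List.map_map]
  rw [List.filter_congr (fun o _ => by
    show (!(PySem.Str.isIn " " (PySem.Str.slice s (some (o : Int)) (some ((o : Int) + (L : Int))))) || sa) = _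
    rw [pvSliceStr, pvCond])]
  apply List.map_congr_left
  intro o _
  show PySem.Str.slice s (some (o : Int)) (some ((o : Int) + (L : Int))) = _
  rw [pvSliceStr]
  rfl

lemma pvLoop (s : String) (sa : Bool) :
    ∀ (k L : Nat), 1 ≤ L → L + k = s.toList.length + 1 → ∀ (acc : List (List String)),
    ((PySem.List.pyRange (L : Int) ((s.toList.length : Int) + 1) 1).foldl
      (fun st length =>
        (st.1 ++ [(st.2.filter (fun p => sa || !p.2)).map (fun p => String.ofList p.1)],
         (st.2.zip (PySem.List.slice s.toList (some length) none)).map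
           (fun q => (q.1.1 ++ [q.2], q.1.2 || (q.2 == ' ')))))
      (acc, pvRowAt s.toList L)).1
      = acc ++ (List.range k).map (fun j => pvOutRow s.toList sa (L + j)) := by
  intro k
  induction k with
  | zero =>
    intro L hL hk acc
    rw [PySem.List.pyRange_one_eq_nil (by exact_mod_cast (by omega : s.toList.length + 1 ≤ L))]
    simp
  | succ k ih =>
    intro L hL hk acc
    rw [PySem.List.pyRange_one_cons (by exact_mod_cast (by omega : L < s.toList.length + 1))]
    rw [List.foldl_cons]
    have h2 : ((pvRowAt s.toList L).zip (PySem.List.slice s.toList (some (L : Int)) none)).map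
        (fun q => (q.1.1 ++ [q.2], q.1.2 || (q.2 == ' '))) = pvRowAt s.toList (L + 1) := by
      rw [PySem.List.slice_from_natCast]
      exact pvRowStep s.toList L (by omega)
    simp only []
    rw [h2, show (L : Int) + 1 = ((L + 1 : Nat) : Int) by push_cast; ring,
        ih (L + 1) (by omega) (by omega) (acc ++ [((pvRowAt s.toList L).filter (fun p => sa || !p.2)).map (fun p => String.ofList p.1)])]
    have hfun : (fun j => pvOutRow s.toList sa (L + 1 + j))
        = (fun j => pvOutRow s.toList sa (L + Nat.succ j)) :=
      funext fun j => by congr 1; omega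
    rw [hfun, List.range_succ_eq_map, List.map_cons, List.map_map]
    simp only [Nat.add_zero, List.append_assoc, List.singleton_append]
    rfl

lemma pvA_eq (s : String) (sa : Bool) :
    get_all_substrings s sa
      = [[]] ++ (List.range s.toList.length).map (fun j => pvOutRow s.toList sa (1 + j)) := by
  simp only [get_all_substrings, PySem.Str.len_eq]
  rw [PySem.List.pyRange_one,
      show (((s.toList.length : Int) + 1) - 1).toNat = s.toList.length by omega,
      PySem.List.foldl_append_singleton_eq_map
        (fun length => (PySem.List.pyRange 0 ((s.toList.length : Int) - length + 1) 1).foldl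
          (fun substrings offset =>
            if !(PySem.Str.isIn " " (PySem.Str.slice s (some offset) (some (offset + length)))) || sa then
              substrings ++ [PySem.Str.slice s (some offset) (some (offset + length))]
            else substrings) []),
      List.map_map]
  congr 1
  apply List.map_congr_left
  intro k hk
  show (PySem.List.pyRange 0 ((s.toList.length : Int) - ((1 : Int) + (k : Int)) + 1) 1).foldl _ [] = _
  rw [show (1 : Int) + (k : Int) = ((1 + k : Nat) : Int) by push_cast; ring]
  exact pvInnerA s sa (1 + k) (by have := List.mem_range.mp hk; omega)

lemma pvB_eq (s : String) (sa : Bool) :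
    get_all_substrings_alt s sa
      = [[]] ++ (List.range s.toList.length).map (fun j => pvOutRow s.toList sa (1 + j)) := by
  simp only [get_all_substrings_alt, PySem.Str.len_eq]
  rw [← pvRowAt_one]
  have h := pvLoop s sa s.toList.length 1 (le_refl 1) (by omega) [[]]
  simp only [Nat.cast_one] at h
  rw [h]

-- ===== VERDICT (by name: the statement is the Claim_ definition above) =====
theorem get_all_substrings_spec : Claim_equal_get_all_substrings := by
  intro s sa _
  unfold Spec_get_all_substrings
  rw [pvA_eq, pvB_eq]
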